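-- pv_equiv track=rewrite | github.com/JoJolM/Essai_traitement_donnees | Traitement_v1/Script_Post_Traitement_v2.py | sum_elements
-- ===== SOURCE A (Python) =====
-- def sum_elements(input_list, num_elements):
--     res = []
--     longr = len(input_list)
--     start_index = num_elements
--
--     for i in range(0, longr, num_elements):
--         output_list = []
--         if i+num_elements>=longr:
--             num_elements = longr - i
--         chunk = input_list[i:i+num_elements]
--         average = sum(chunk)
--         output_list.append(average)
--         output_list = output_list * num_elements
--         res = res + output_list
--
--     return res
-- ===== SOURCE B (Python) =====
-- def sum_elements(input_list, num_elements):
--     # Prefix-sum approach: out[j] is the sum of the block containing index j,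
--     # computed per element as a difference of two prefix sums.
--     if num_elements <= 0:
--         return []
--     n = len(input_list)
--     prefix = [0]
--     for x in input_list:
--         prefix.append(prefix[-1] + x)
--     k = num_elements
--     return [prefix[min(j - j % k + k, n)] - prefix[j - j % k] for j in range(n)]
-- ===== Notes on version B (the rewrite author's own statement) =====
-- stated objective: alternative
-- what changed: A's single loop over chunk starts (slice each chunk, sum it, repeat the sum, while mutating num_elements) is replaced by a prefix-sum table built once plus a per-output-index closed form: out[j] = prefix[min(j - j%k + k, n)] - prefix[j - j%k]; no slicing, no replication, no mutated loop state. Pre_ excludes num_elements = 0, where A raises ValueError (range step 0).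
import Mathlib
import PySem

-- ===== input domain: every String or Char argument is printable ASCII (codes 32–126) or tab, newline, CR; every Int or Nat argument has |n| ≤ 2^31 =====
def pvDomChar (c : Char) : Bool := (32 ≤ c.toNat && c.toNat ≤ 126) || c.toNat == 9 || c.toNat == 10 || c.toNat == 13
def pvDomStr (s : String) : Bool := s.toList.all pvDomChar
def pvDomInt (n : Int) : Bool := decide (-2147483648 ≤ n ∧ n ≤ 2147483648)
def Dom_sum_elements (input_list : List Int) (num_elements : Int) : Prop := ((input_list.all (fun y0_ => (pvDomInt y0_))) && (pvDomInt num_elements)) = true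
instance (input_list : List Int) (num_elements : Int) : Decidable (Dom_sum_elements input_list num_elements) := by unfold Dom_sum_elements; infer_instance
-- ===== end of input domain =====

-- B replaces A's chunk loop (sum each slice, repeat it) by a prefix-sum table and a
-- per-output-index closed form (alternative decomposition; same asymptotic cost).

-- ===== PORT A =====
-- Loop 'for i in range(0, longr, num_elements)' over mutable state (res, num_elements).
-- 'output_list * num_elements' (Python list repetition, empty for counts ≤ 0) is
-- List.replicate ne.toNat, exact since toNat sends negatives to 0.
def sum_elements (input_list : List Int) (num_elements : Int) : List Int :=
  let longr : Int := input_list.length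
  ((PySem.List.pyRange 0 longr num_elements).foldl
    (fun (st : List Int × Int) i =>
      let ne := if i + st.2 ≥ longr then longr - i else st.2
      let chunk := PySem.List.slice input_list (some i) (some (i + ne))
      let average := chunk.sum
      let output_list := List.replicate ne.toNat average
      (st.1 ++ output_list, ne))
    ([], num_elements)).1

-- ===== PORT B =====
-- prefix[-1] is pyGetD … (-1) 0: the prefix list is never empty, so the default 0 is
-- never used; likewise both comprehension indices always lie in [0, len(prefix)).
def sum_elements_alt (input_list : List Int) (num_elements : Int) : List Int :=
  if num_elements ≤ 0 then []
  else
    let n : Int := input_list.length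
    let pre := input_list.foldl (fun ps x => ps ++ [PySem.List.pyGetD ps (-1) 0 + x]) [(0 : Int)]
    let k := num_elements
    (PySem.List.pyRange 0 n 1).map (fun j =>
      PySem.List.pyGetD pre (min (j - PySem.Int.mod j k + k) n) 0
      - PySem.List.pyGetD pre (j - PySem.Int.mod j k) 0)

-- ===== PRECONDITION & SPEC =====
-- Pre_ excludes only num_elements = 0, where Python's range(0, len, 0) raises ValueError in A.
def Pre_sum_elements (input_list : List Int) (num_elements : Int) : Prop := num_elements ≠ 0
instance (input_list : List Int) (num_elements : Int) : Decidable (Pre_sum_elements input_list num_elements) := by unfold Pre_sum_elements; infer_instance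
def pvWitness_sum_elements : List Int × Int := ([1, 2, 3, 4, 5], 2)

def Spec_sum_elements (input_list : List Int) (num_elements : Int) (out : List Int) : Prop := out = sum_elements_alt input_list num_elements
instance (input_list : List Int) (num_elements : Int) (out : List Int) : Decidable (Spec_sum_elements input_list num_elements out) := by unfold Spec_sum_elements; infer_instance

-- ===== CLAIM (what is proved, stated in full; the proofs are below) =====
def Claim_equal_sum_elements : Prop := ∀ (input_list : List Int) (num_elements : Int), Dom_sum_elements input_list num_elements → Pre_sum_elements input_list num_elements → Spec_sum_elements input_list num_elements (sum_elements input_list num_elements)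

-- ===== LEMMAS AND PROOFS =====

-- range(a, b, s) for positive s and a < b starts with a.
lemma pyRange_pos_cons (a b s : Int) (hs : 0 < s) (hab : a < b) :
    PySem.List.pyRange a b s = a :: PySem.List.pyRange (a + s) b s := by
  rw [PySem.List.pyRange_of_pos _ _ hs, PySem.List.pyRange_of_pos _ _ hs]
  have hd : (b - a + s - 1) / s = (b - a - 1) / s + 1 := by
    rw [show b - a + s - 1 = (b - a - 1) + 1 * s by ring,
        Int.add_mul_ediv_right _ _ (by omega : s ≠ 0)]
  have hnn : 0 ≤ (b - a - 1) / s := Int.ediv_nonneg (by omega) (by omega)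
  have hcnt : ((b - a + s - 1) / s).toNat = ((b - a - 1) / s).toNat + 1 := by
    omega
  rw [if_pos hab, hcnt, List.range_succ_eq_map, List.map_cons, List.map_map]
  refine List.cons_eq_cons.mpr ⟨by simp, ?_⟩
  by_cases h : a + s < b
  · rw [if_pos h]
    have : b - (a + s) + s - 1 = b - a - 1 := by ring
    rw [this]
    apply List.map_congr_left
    intro k _
    simp only [Function.comp_apply]
    push_cast
    ring
  · rw [if_neg h]
    have h0 : (b - a - 1) / s = 0 :=
      Int.ediv_eq_zero_of_lt (by omega) (by omega)
    simp [h0]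

-- range(a, b, s) for positive s and b ≤ a is empty.
lemma pyRange_pos_nil (a b s : Int) (hs : 0 < s) (hab : b ≤ a) :
    PySem.List.pyRange a b s = [] := by
  rw [PySem.List.pyRange_of_pos _ _ hs, if_neg (by omega)]
  simp

-- range(a, b, s) for negative s and a ≤ b is empty.
lemma pyRange_neg_nil (a b s : Int) (hs : s < 0) (hab : a ≤ b) :
    PySem.List.pyRange a b s = [] := by
  rw [PySem.List.pyRange_of_neg _ _ hs, if_neg (by omega)]
  simp

-- A slice clamps: once the stop index passes the length, it equals stopping at the length.
lemma slice_clamp (xs : List Int) (a b c : Int) (ha : 0 ≤ a)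
    (hb : (xs.length : Int) ≤ b) (hc : (xs.length : Int) ≤ c) :
    PySem.List.slice xs (some a) (some b) = PySem.List.slice xs (some a) (some c) := by
  rw [PySem.List.slice_toNat xs ha (by omega), PySem.List.slice_toNat xs ha (by omega)]
  rw [List.take_of_length_le (by simp; omega), List.take_of_length_le (by simp; omega)]

-- A's fold with mutable num_elements agrees with the pure chunk fold.
lemma loop_eq (xs : List Int) (num : Int) (hnum : 0 < num) :
    ∀ (k : Nat) (a : Int) (res : List Int), 0 ≤ a → ((xs.length : Int) - a).toNat ≤ k →
      ((PySem.List.pyRange a (xs.length : Int) num).foldl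
        (fun (st : List Int × Int) i =>
          let ne := if i + st.2 ≥ (xs.length : Int) then (xs.length : Int) - i else st.2
          (st.1 ++ List.replicate ne.toNat
            (PySem.List.slice xs (some i) (some (i + ne))).sum, ne))
        (res, num)).1
      = (PySem.List.pyRange a (xs.length : Int) num).foldl
          (fun r i => r ++ List.replicate (min num ((xs.length : Int) - i)).toNat
            (PySem.List.slice xs (some i) (some (i + num))).sum) res := by
  intro k
  induction k with
  | zero =>
    intro a res ha hk
    rw [pyRange_pos_nil _ _ _ hnum (by omega)]
    rfl
  | succ k ih =>
    intro a res ha hk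
    by_cases hab : a < (xs.length : Int)
    · rw [pyRange_pos_cons _ _ _ hnum hab]
      simp only [List.foldl_cons]
      by_cases h : a + num ≥ (xs.length : Int)
      · rw [if_pos h]
        have hmin : min num ((xs.length : Int) - a) = (xs.length : Int) - a := by omega
        have hslice : PySem.List.slice xs (some a) (some ((xs.length : Int)))
            = PySem.List.slice xs (some a) (some (a + num)) :=
          slice_clamp xs a _ _ ha (by omega) (by omega)
        rw [pyRange_pos_nil _ _ _ hnum (by omega)]
        simp [hmin, hslice]
      · rw [if_neg h]
        have hmin : min num ((xs.length : Int) - a) = num := by omega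
        rw [hmin]
        exact ih (a + num) _ (by omega) (by omega)
    · rw [pyRange_pos_nil _ _ _ hnum (by omega)]
      rfl

-- B's prefix loop builds the table of prefix sums.
lemma prefix_eq (xs : List Int) :
    xs.foldl (fun ps x => ps ++ [PySem.List.pyGetD ps (-1) 0 + x]) [(0 : Int)]
    = (List.range (xs.length + 1)).map (fun i => (xs.take i).sum) := by
  induction xs using List.reverseRecOn with
  | nil => simp
  | append_singleton ys x ih =>
    rw [List.foldl_append, ih, List.foldl_cons, List.foldl_nil]
    have h1 : List.range (ys.length + 1) = List.range ys.length ++ [ys.length] :=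
      List.range_succ
    have h2 : (ys ++ [x]).length + 1 = (ys.length + 1) + 1 := by simp
    rw [h1, List.map_append, List.map_singleton,
        PySem.List.pyGetD_neg_one_append_singleton, h2,
        List.range_succ (n := ys.length + 1), List.map_append, List.map_singleton,
        h1, List.map_append, List.map_singleton]
    have hcong : List.map (fun i => ((ys ++ [x]).take i).sum) (List.range ys.length)
        = List.map (fun i => (ys.take i).sum) (List.range ys.length) := by
      apply List.map_congr_left
      intro i hi
      rw [List.take_append_of_le_length (le_of_lt (List.mem_range.mp hi))]
    have e1 : (ys ++ [x]).take ys.length = ys := by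
      rw [List.take_append_of_le_length le_rfl, List.take_length]
    have e2 : (ys ++ [x]).take (ys.length + 1) = ys ++ [x] :=
      List.take_of_length_le (by simp)
    rw [hcong, e1, e2, List.take_length, List.sum_append, List.append_assoc,
        List.append_assoc]
    simp

-- Reading the prefix table at an in-range index.
lemma prefix_get (xs : List Int) (i : Int) (h0 : 0 ≤ i) (h1 : i ≤ (xs.length : Int)) :
    PySem.List.pyGetD ((List.range (xs.length + 1)).map (fun i => (xs.take i).sum)) i 0
    = (xs.take i.toNat).sum := by
  rw [PySem.List.pyGetD_eq_getElem _ _ h0 (by simp; omega)]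
  rw [List.getElem_map, List.getElem_range]

-- A slice's sum is a difference of prefix sums (with the clamped upper bound).
lemma slice_sum_eq (xs : List Int) (a k : Int) (ha : 0 ≤ a) (hk : 0 < k) :
    (PySem.List.slice xs (some a) (some (a + k))).sum
    = (xs.take (min (a + k) (xs.length : Int)).toNat).sum - (xs.take a.toNat).sum := by
  rw [PySem.List.slice_toNat xs ha (by omega)]
  have hT : (a + k).toNat = a.toNat + k.toNat := by omega
  have hsplit : xs.take (a.toNat + k.toNat)
      = xs.take a.toNat ++ (xs.drop a.toNat).take k.toNat := List.take_add
  have hmin : xs.take (min (a + k) (xs.length : Int)).toNat = xs.take (a.toNat + k.toNat) := by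
    by_cases h : a + k ≤ (xs.length : Int)
    · rw [min_eq_left h, hT]
    · rw [min_eq_right (by omega)]
      rw [List.take_of_length_le (by omega), List.take_of_length_le (by omega)]
  rw [hT, show a.toNat + k.toNat - a.toNat = k.toNat from by omega, hmin, hsplit,
      List.sum_append]
  ring

-- Inside one block [a, a+k) with k ∣ a, flooring j to its block start gives a.
lemma block_start (a k j : Int) (hk : 0 < k) (hdvd : k ∣ a) (h1 : a ≤ j) (h2 : j < a + k) :
    j - PySem.Int.mod j k = a := by
  obtain ⟨m, rfl⟩ := hdvd
  rw [PySem.Int.mod_eq_emod_of_pos hk]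
  have : j = (j - k * m) + k * m := by ring
  rw [this, Int.add_mul_emod_self_left, Int.emod_eq_of_lt (by omega) (by omega)]
  ring

-- The chunk fold equals B's per-index map, for every block-aligned start a.
lemma expand_eq (xs : List Int) (k : Int) (hk : 0 < k) :
    ∀ (fuel : Nat) (a : Int) (res : List Int), 0 ≤ a → k ∣ a →
      (((xs.length : Int)) - a).toNat ≤ fuel →
      (PySem.List.pyRange a (xs.length : Int) k).foldl
        (fun r i => r ++ List.replicate (min k ((xs.length : Int) - i)).toNat
          (PySem.List.slice xs (some i) (some (i + k))).sum) res
      = res ++ (PySem.List.pyRange a (xs.length : Int) 1).map (fun j =>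
          PySem.List.pyGetD ((List.range (xs.length + 1)).map (fun i => (xs.take i).sum))
            (min (j - PySem.Int.mod j k + k) (xs.length : Int)) 0
          - PySem.List.pyGetD ((List.range (xs.length + 1)).map (fun i => (xs.take i).sum))
            (j - PySem.Int.mod j k) 0) := by
  intro fuel
  induction fuel with
  | zero =>
    intro a res ha _ hfuel
    rw [pyRange_pos_nil _ _ _ hk (by omega), PySem.List.pyRange_one_eq_nil (by omega)]
    simp
  | succ fuel ih =>
    intro a res ha hdvd hfuel
    set n : Int := (xs.length : Int) with hn
    by_cases hab : a < n
    · rw [pyRange_pos_cons _ _ _ hk hab, List.foldl_cons]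
      rw [ih (a + k) _ (by omega) (by exact Dvd.dvd.add hdvd ⟨1, by ring⟩) (by omega)]
      set b : Int := min (a + k) n with hb
      have hsplit : PySem.List.pyRange a n 1
          = PySem.List.pyRange a b 1 ++ PySem.List.pyRange b n 1 :=
        PySem.List.pyRange_one_append a b n (by omega) (by omega)
      have htail : PySem.List.pyRange b n 1 = PySem.List.pyRange (a + k) n 1 := by
        by_cases h : a + k ≤ n
        · rw [hb, min_eq_left h]
        · rw [hb, min_eq_right (by omega),
              PySem.List.pyRange_one_eq_nil (le_refl n),
              PySem.List.pyRange_one_eq_nil (by omega)]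
      have hhead : (PySem.List.pyRange a b 1).map (fun j =>
            PySem.List.pyGetD ((List.range (xs.length + 1)).map (fun i => (xs.take i).sum))
              (min (j - PySem.Int.mod j k + k) n) 0
            - PySem.List.pyGetD ((List.range (xs.length + 1)).map (fun i => (xs.take i).sum))
              (j - PySem.Int.mod j k) 0)
          = List.replicate (min k (n - a)).toNat
              (PySem.List.slice xs (some a) (some (a + k))).sum := by
        have hconst : ∀ j ∈ PySem.List.pyRange a b 1,
            (PySem.List.pyGetD ((List.range (xs.length + 1)).map (fun i => (xs.take i).sum))
              (min (j - PySem.Int.mod j k + k) n) 0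
            - PySem.List.pyGetD ((List.range (xs.length + 1)).map (fun i => (xs.take i).sum))
              (j - PySem.Int.mod j k) 0)
            = (PySem.List.slice xs (some a) (some (a + k))).sum := by
          intro j hj
          obtain ⟨hj1, hj2⟩ := (PySem.List.mem_pyRange_one).mp hj
          have hstart : j - PySem.Int.mod j k = a :=
            block_start a k j hk hdvd hj1 (by omega)
          rw [hstart, prefix_get xs _ (by omega) (by omega),
              prefix_get xs a ha (by omega), slice_sum_eq xs a k ha hk]
        rw [List.map_congr_left hconst, List.map_const']
        rw [PySem.List.length_pyRange_one]
        congr 1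
        omega
      rw [hsplit, List.map_append, htail, hhead, List.append_assoc]
    · rw [pyRange_pos_nil _ _ _ hk (by omega), PySem.List.pyRange_one_eq_nil (by omega)]
      simp

-- ===== VERDICT (by name: the statement is the Claim_ definition above) =====
theorem sum_elements_spec : Claim_equal_sum_elements := by
  intro xs num _ hpre
  unfold Spec_sum_elements
  have hA : sum_elements xs num
      = ((PySem.List.pyRange 0 (xs.length : Int) num).foldl
          (fun (st : List Int × Int) i =>
            let ne := if i + st.2 ≥ (xs.length : Int) then (xs.length : Int) - i else st.2
            (st.1 ++ List.replicate ne.toNat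
              (PySem.List.slice xs (some i) (some (i + ne))).sum, ne))
          ([], num)).1 := rfl
  rcases lt_trichotomy num 0 with h | h | h
  · have hB : sum_elements_alt xs num = [] := by
      unfold sum_elements_alt
      rw [if_pos (le_of_lt h)]
    rw [hA, hB, pyRange_neg_nil _ _ _ h (Int.natCast_nonneg _)]
    rfl
  · exact absurd h hpre
  · have hB : sum_elements_alt xs num
        = (PySem.List.pyRange 0 (xs.length : Int) 1).map (fun j =>
            PySem.List.pyGetD ((List.range (xs.length + 1)).map (fun i => (xs.take i).sum))
              (min (j - PySem.Int.mod j num + num) (xs.length : Int)) 0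
            - PySem.List.pyGetD ((List.range (xs.length + 1)).map (fun i => (xs.take i).sum))
              (j - PySem.Int.mod j num) 0) := by
      unfold sum_elements_alt
      rw [if_neg (by omega), prefix_eq]
    rw [hA, hB, loop_eq xs num h ((xs.length : Int)).toNat 0 [] le_rfl (by omega),
        expand_eq xs num h ((xs.length : Int)).toNat 0 [] le_rfl ⟨0, by ring⟩ (by omega)]
    rfl
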